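-- pv_equiv track=rewrite | github.com/luciotag/Proyectos | CMS1.py | filasParecidas
-- ===== SOURCE A (Python) =====
-- from typing import List
-- from typing import List
--
-- def filaAnteriorMasN(m: List[List[int]], i:int, n:int) -> bool :
--    if i > 0 and i < len(m):
--         for j in range(len(m[0])):
--             if m[i][j] != m[i - 1][j] + n:
--                 return False
--         return True
--    else:
--         return False
--
-- def filasParecidasAanterior(l: List[List[int]], n:int) -> bool :
--     for i in range(1, len(l)):
--         if not filaAnteriorMasN(l, i, n):
--             return False
--
--     return True
--
-- def esMatriz (l: List[List[int]]) -> bool :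
--   if len(l) > 0 and len(l[0]) > 0:
--     for i in range (0, len(l)):
--       if len(l[i]) != len(l[0]):
--         return False
--     return True
--   else:
--     return False
--
-- def filasParecidas (l: List[List[int]]) -> bool :
--   if esMatriz(l) == True:
--     for n in range (0, len(l)):
--       if filasParecidasAanterior(l,n) == True:
--         return True
--     return False
--   else:
--     return False
-- ===== SOURCE B (Python) =====
-- from typing import List
--
-- def filasParecidas(l: List[List[int]]) -> bool:
--     """True iff l is a non-empty rectangular matrix with non-empty rows and,
--     for some n in range(len(l)), every row equals the previous row plus n."""
--     if not l or not l[0] or any(len(row) != len(l[0]) for row in l):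
--         return False
--     deltas = {b[j] - a[j] for a, b in zip(l, l[1:]) for j in range(len(l[0]))}
--     if not deltas:
--         return True
--     return any(deltas == {n} for n in range(len(l)))
-- ===== Notes on version B (the rewrite author's own statement) =====
-- stated objective: alternative
-- what changed: B collects the set of all adjacent-row differences in one pass and then only tests whether that set is the singleton {n} for some candidate n in range(len(l)), instead of A's re-scanning the whole matrix once per candidate n.
import Mathlib
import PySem

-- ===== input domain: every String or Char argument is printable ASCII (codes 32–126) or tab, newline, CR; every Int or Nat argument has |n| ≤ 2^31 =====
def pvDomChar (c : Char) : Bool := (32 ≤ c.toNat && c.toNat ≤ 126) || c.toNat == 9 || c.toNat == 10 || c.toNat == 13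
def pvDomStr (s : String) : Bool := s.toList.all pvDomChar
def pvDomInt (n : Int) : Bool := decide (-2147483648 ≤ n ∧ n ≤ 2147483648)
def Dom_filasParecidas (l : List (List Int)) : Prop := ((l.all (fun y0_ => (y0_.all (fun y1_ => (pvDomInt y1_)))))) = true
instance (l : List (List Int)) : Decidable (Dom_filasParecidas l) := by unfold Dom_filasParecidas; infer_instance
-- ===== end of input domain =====

-- B builds the set of all adjacent-row differences once and tests it against the
-- singleton {n} per candidate n, instead of A's full re-scan per candidate (objective: alternative).

-- ===== PORT A =====
def filaAnteriorMasN (m : List (List Int)) (i n : Int) : Bool :=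
  if 0 < i ∧ i < PySem.List.len m then
    (PySem.List.pyRange 0 (PySem.List.len (PySem.List.pyGetD m 0 [])) 1).all (fun j =>
      PySem.List.pyGetD (PySem.List.pyGetD m i []) j 0 ==
        PySem.List.pyGetD (PySem.List.pyGetD m (i - 1) []) j 0 + n)
  else false

def filasParecidasAanterior (l : List (List Int)) (n : Int) : Bool :=
  (PySem.List.pyRange 1 (PySem.List.len l) 1).all (fun i => filaAnteriorMasN l i n)

def esMatriz (l : List (List Int)) : Bool :=
  if 0 < PySem.List.len l ∧ 0 < PySem.List.len (PySem.List.pyGetD l 0 []) then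
    (PySem.List.pyRange 0 (PySem.List.len l) 1).all (fun i =>
      PySem.List.len (PySem.List.pyGetD l i []) == PySem.List.len (PySem.List.pyGetD l 0 []))
  else false

def filasParecidas (l : List (List Int)) : Bool :=
  if esMatriz l == true then
    (PySem.List.pyRange 0 (PySem.List.len l) 1).any (fun n => filasParecidasAanterior l n == true)
  else false

-- ===== PORT B =====
def filasParecidas_alt (l : List (List Int)) : Bool :=
  match l with
  | [] => false
  | r0 :: rest =>
    if r0.length = 0 ∨ (r0 :: rest).any (fun r => r.length ≠ r0.length) then false
    else
      let deltas : PySem.Set Int := PySem.Set.ofList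
        (((r0 :: rest).zip rest).flatMap (fun p =>
          (List.range r0.length).map (fun j => (p.2).getD j 0 - (p.1).getD j 0)))
      if deltas.isEmpty then true
      else
        (PySem.List.pyRange 0 (PySem.List.len (r0 :: rest)) 1).any (fun n =>
          PySem.Set.equal deltas (PySem.Set.ofList [n]))

-- ===== PRECONDITION & SPEC =====
def Spec_filasParecidas (l : List (List Int)) (out : Bool) : Prop := out = filasParecidas_alt l
instance (l : List (List Int)) (out : Bool) : Decidable (Spec_filasParecidas l out) := by unfold Spec_filasParecidas; infer_instance

-- ===== CLAIM (what is proved, stated in full; the proofs are below) =====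
def Claim_equal_filasParecidas : Prop := ∀ (l : List (List Int)), Dom_filasParecidas l → Spec_filasParecidas l (filasParecidas l)

-- ===== LEMMAS AND PROOFS =====

-- width of the matrix (length of the first row)
def pvW (l : List (List Int)) : Nat := (l.getD 0 []).length

-- "l is a non-degenerate matrix"
def pvMatP (l : List (List Int)) : Prop :=
  l ≠ [] ∧ 0 < pvW l ∧ ∀ r ∈ l, r.length = pvW l

-- "every row is the previous row plus d" at width pvW l
def pvConsP (l : List (List Int)) (d : Int) : Prop :=
  ∀ i < l.length - 1, ∀ j < pvW l,
    (l.getD (i + 1) []).getD j 0 = (l.getD i []).getD j 0 + d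

-- the list of adjacent-row differences B's set is built from
def pvFlat (l : List (List Int)) : List Int :=
  (l.zip l.tail).flatMap (fun p =>
    (List.range (pvW l)).map (fun j => (p.2).getD j 0 - (p.1).getD j 0))

theorem pv_esMatriz_iff (l : List (List Int)) : esMatriz l = true ↔ pvMatP l := by
  unfold esMatriz pvMatP pvW
  simp only [PySem.List.len_eq, PySem.List.pyGetD_zero]
  split_ifs with h
  · simp only [List.all_eq_true, PySem.List.mem_pyRange_one, beq_iff_eq]
    constructor
    · intro hall
      refine ⟨by rintro rfl; simp at h, by exact_mod_cast h.2, ?_⟩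
      intro r hr
      obtain ⟨k, hk, rfl⟩ := List.getElem_of_mem hr
      have := hall (k : Int) ⟨by positivity, by exact_mod_cast hk⟩
      simpa [PySem.List.pyGetD_natCast, List.getD_eq_getElem?_getD, List.getElem?_eq_getElem hk] using this
    · rintro ⟨-, -, hall⟩
      rintro i ⟨hi0, hil⟩
      have hil' : i.toNat < l.length := by omega
      have := hall l[i.toNat] (List.getElem_mem hil')
      rw [PySem.List.pyGetD_eq_getElem _ _ hi0 (by simpa using hil), this]
  · constructor
    · intro hf; cases hf
    · rintro ⟨h1, h2, -⟩
      exfalso; apply h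
      refine ⟨by simpa using List.length_pos_of_ne_nil h1, by exact_mod_cast h2⟩

theorem pv_fam_iff (l : List (List Int)) (n : Int) (i : Nat) (h : i + 1 < l.length) :
    filaAnteriorMasN l ((i : Int) + 1) n = true ↔
      ∀ j : Nat, j < pvW l → (l.getD (i + 1) []).getD j 0 = (l.getD i []).getD j 0 + n := by
  unfold filaAnteriorMasN
  rw [if_pos (by simp only [PySem.List.len_eq]; omega)]
  have hcast : ((i : Int) + 1) = ((i + 1 : Nat) : Int) := by push_cast; ring
  have hsub : ((i + 1 : Nat) : Int) - 1 = ((i : Nat) : Int) := by push_cast; ring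
  simp only [List.all_eq_true, PySem.List.mem_pyRange_one, beq_iff_eq, PySem.List.len_eq,
    PySem.List.pyGetD_zero, hcast, hsub, PySem.List.pyGetD_natCast]
  constructor
  · intro hall j hj
    have := hall (j : Int) ⟨by positivity, by exact_mod_cast hj⟩
    simpa using this
  · rintro hall j ⟨hj0, hjw⟩
    have := hall j.toNat (by unfold pvW; omega)
    rw [← Int.toNat_of_nonneg hj0, PySem.List.pyGetD_natCast, PySem.List.pyGetD_natCast]
    exact this

theorem pv_fpa_iff (l : List (List Int)) (n : Int) :
    filasParecidasAanterior l n = true ↔ pvConsP l n := by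
  unfold filasParecidasAanterior pvConsP
  simp only [List.all_eq_true, PySem.List.mem_pyRange_one, PySem.List.len_eq]
  constructor
  · intro hall i hi j hj
    have h1 : i + 1 < l.length := by omega
    have := (pv_fam_iff l n i h1).mp (hall ((i : Int) + 1) ⟨by omega, by omega⟩)
    exact this j hj
  · rintro hc i ⟨hi1, hil⟩
    have hk : (i - 1).toNat + 1 < l.length := by omega
    have hi' : i = (((i - 1).toNat : Nat) : Int) + 1 := by omega
    rw [hi']
    exact (pv_fam_iff l n _ hk).mpr (fun j hj => hc _ (by omega) j hj)

theorem pv_A_iff (l : List (List Int)) :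
    filasParecidas l = true ↔ pvMatP l ∧ ∃ n : Int, 0 ≤ n ∧ n < (l.length : Int) ∧ pvConsP l n := by
  unfold filasParecidas
  by_cases hM : esMatriz l = true
  · rw [if_pos (by simpa using hM)]
    rw [pv_esMatriz_iff] at hM
    simp only [List.any_eq_true, PySem.List.mem_pyRange_one, beq_iff_eq, PySem.List.len_eq]
    constructor
    · rintro ⟨n, ⟨h0, hn⟩, hfpa⟩
      exact ⟨hM, n, h0, hn, (pv_fpa_iff l n).mp hfpa⟩
    · rintro ⟨-, n, h0, hn, hc⟩
      exact ⟨n, ⟨h0, hn⟩, (pv_fpa_iff l n).mpr hc⟩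
  · rw [if_neg (by simpa using hM)]
    constructor
    · intro hf; cases hf
    · rintro ⟨hMp, -⟩
      exact absurd ((pv_esMatriz_iff l).mpr hMp) hM

theorem pv_mem_zip_adj {α : Type} [Inhabited α] (l : List α) (p : α × α) :
    p ∈ l.zip l.tail ↔ ∃ i : Nat, i + 1 < l.length ∧ p = (l.getD i default, l.getD (i + 1) default) := by
  induction l with
  | nil => simp
  | cons a t ih =>
    cases t with
    | nil => simp
    | cons b t2 =>
      rw [List.tail_cons, List.zip_cons_cons, List.mem_cons,
        show ((b :: t2).zip t2) = ((b :: t2).zip (b :: t2).tail) from rfl, ih]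
      constructor
      · rintro (rfl | ⟨i, hi, rfl⟩)
        · exact ⟨0, by simp, by simp⟩
        · exact ⟨i + 1, by simpa using hi, by simp⟩
      · rintro ⟨i, hi, rfl⟩
        cases i with
        | zero => exact Or.inl (by simp)
        | succ k => exact Or.inr ⟨k, by simpa using hi, by simp⟩

theorem pv_mem_flat (l : List (List Int)) (x : Int) :
    x ∈ pvFlat l ↔ ∃ i : Nat, i + 1 < l.length ∧ ∃ j < pvW l,
      x = (l.getD (i + 1) []).getD j 0 - (l.getD i []).getD j 0 := by
  unfold pvFlat
  simp only [List.mem_flatMap, List.mem_map, List.mem_range]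
  constructor
  · rintro ⟨p, hp, j, hj, rfl⟩
    obtain ⟨i, hi, rfl⟩ := (pv_mem_zip_adj l p).mp hp
    exact ⟨i, hi, j, hj, rfl⟩
  · rintro ⟨i, hi, j, hj, rfl⟩
    exact ⟨(l.getD i [], l.getD (i + 1) []),
      (pv_mem_zip_adj l _).mpr ⟨i, hi, rfl⟩, j, hj, rfl⟩

theorem pv_consP_iff_flat (l : List (List Int)) (n : Int) :
    pvConsP l n ↔ ∀ x ∈ pvFlat l, x = n := by
  unfold pvConsP
  constructor
  · intro hc x hx
    obtain ⟨i, hi, j, hj, rfl⟩ := (pv_mem_flat l x).mp hx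
    have := hc i (by omega) j hj
    omega
  · intro hall i hi j hj
    have := hall _ ((pv_mem_flat l _).mpr ⟨i, by omega, j, hj, rfl⟩)
    omega

theorem pv_flat_ne_nil (l : List (List Int)) (h2 : 2 ≤ l.length) (hw : 0 < pvW l) :
    pvFlat l ≠ [] := by
  intro hnil
  have : (l.getD 1 []).getD 0 0 - (l.getD 0 []).getD 0 0 ∈ pvFlat l :=
    (pv_mem_flat l _).mpr ⟨0, by omega, 0, hw, by simp⟩
  rw [hnil] at this
  cases this

theorem pv_B_iff (l : List (List Int)) :
    filasParecidas_alt l = true ↔ pvMatP l ∧ (l.length = 1 ∨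
      ∃ n : Int, (0 ≤ n ∧ n < (l.length : Int)) ∧ n ∈ pvFlat l ∧ ∀ x ∈ pvFlat l, x = n) := by
  cases l with
  | nil => simp [filasParecidas_alt, pvMatP]
  | cons r0 rest =>
    have hW : pvW (r0 :: rest) = r0.length := by simp [pvW]
    have hflat : pvFlat (r0 :: rest) =
        ((r0 :: rest).zip rest).flatMap (fun p =>
          (List.range r0.length).map (fun j => (p.2).getD j 0 - (p.1).getD j 0)) := by
      unfold pvFlat; rw [hW]; rfl
    simp only [filasParecidas_alt]
    by_cases hbad : r0.length = 0 ∨ ((r0 :: rest).any (fun r => r.length ≠ r0.length)) = true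
    · rw [if_pos hbad]
      constructor
      · intro hf; cases hf
      · rintro ⟨⟨-, hpos, hall⟩, -⟩
        rw [hW] at hpos
        rcases hbad with h0 | hA
        · omega
        · simp only [List.any_eq_true, decide_eq_true_eq] at hA
          obtain ⟨r, hr, hrl⟩ := hA
          exact absurd (hall r hr) (by rw [hW]; exact hrl)
    · rw [if_neg hbad]
      push Not at hbad
      obtain ⟨hw0, hA⟩ := hbad
      have hA' : ∀ r ∈ (r0 :: rest), r.length = r0.length := by
        intro r hr
        by_contra hne
        exact hA (List.any_eq_true.mpr ⟨r, hr, by simpa using hne⟩)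
      have hMat : pvMatP (r0 :: rest) := ⟨List.cons_ne_nil r0 rest, by rw [hW]; omega,
        fun r hr => by rw [hW]; exact hA' r hr⟩
      simp only [← hflat]
      by_cases hemp : (PySem.Set.ofList (pvFlat (r0 :: rest))).isEmpty = true
      · rw [if_pos hemp]
        have hfe : pvFlat (r0 :: rest) = [] := by
          rw [List.isEmpty_iff] at hemp
          by_contra hne
          obtain ⟨y, hy⟩ := List.exists_mem_of_ne_nil _ hne
          have : y ∈ PySem.Set.ofList (pvFlat (r0 :: rest)) := (PySem.Set.mem_ofList _ _).mpr hy
          rw [hemp] at this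
          cases this
        have hlen1 : (r0 :: rest).length = 1 := by
          by_contra h1
          have h2 : 2 ≤ (r0 :: rest).length := by
            cases rest with
            | nil => exact absurd rfl h1
            | cons r1 t => simp only [List.length_cons]; omega
          exact pv_flat_ne_nil _ h2 (by rw [hW]; omega) hfe
        exact iff_of_true rfl ⟨hMat, Or.inl hlen1⟩
      · rw [if_neg hemp]
        have hfe : pvFlat (r0 :: rest) ≠ [] := by
          intro hnil
          rw [hnil] at hemp
          exact hemp rfl
        simp only [List.any_eq_true, PySem.List.mem_pyRange_one, PySem.List.len_eq]
        constructor
        · rintro ⟨n, ⟨h0, hn⟩, heq⟩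
          have := (PySem.Set.equal_iff _ _).mp heq
          refine ⟨hMat, Or.inr ⟨n, ⟨h0, hn⟩, ?_, ?_⟩⟩
          · have : n ∈ PySem.Set.ofList (pvFlat (r0 :: rest)) := by
              rw [this n]
              simp [PySem.Set.mem_ofList]
            exact (PySem.Set.mem_ofList _ _).mp this
          · intro x hx
            have hxs := (this x).mp ((PySem.Set.mem_ofList _ _).mpr hx)
            simpa [PySem.Set.mem_ofList] using hxs
        · rintro ⟨-, h1 | ⟨n, ⟨h0, hn⟩, hmem, hall⟩⟩
          · exfalso
            apply hfe
            cases rest with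
            | nil => rfl
            | cons r1 rest2 => simp at h1
          · refine ⟨n, ⟨h0, hn⟩, (PySem.Set.equal_iff _ _).mpr ?_⟩
            intro x
            simp only [PySem.Set.mem_ofList, List.mem_singleton]
            constructor
            · exact fun hx => hall x hx
            · rintro rfl; exact hmem

-- ===== VERDICT (by name: the statement is the Claim_ definition above) =====
theorem filasParecidas_spec : Claim_equal_filasParecidas := by
  intro l _
  unfold Spec_filasParecidas
  rw [Bool.eq_iff_iff, pv_A_iff, pv_B_iff]
  constructor
  · rintro ⟨hM, n, h0, hn, hc⟩
    refine ⟨hM, ?_⟩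
    by_cases h1 : l.length = 1
    · exact Or.inl h1
    · have h2 : 2 ≤ l.length := by
        have := List.length_pos_of_ne_nil hM.1; omega
      have hall := (pv_consP_iff_flat l n).mp hc
      have hne := pv_flat_ne_nil l h2 hM.2.1
      obtain ⟨y, hy⟩ := List.exists_mem_of_ne_nil _ hne
      have hyn := hall y hy
      exact Or.inr ⟨n, ⟨h0, hn⟩, hyn ▸ hy, hall⟩
  · rintro ⟨hM, h1 | ⟨n, ⟨h0, hn⟩, -, hall⟩⟩
    · refine ⟨hM, 0, le_refl 0, by rw [h1]; norm_num,
        fun i hi => absurd hi (by omega)⟩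
    · exact ⟨hM, n, h0, hn, (pv_consP_iff_flat l n).mpr hall⟩
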